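-- pv_equiv track=rewrite | github.com/ToineLey/Projet-NSI-1 | NSI/Travail/glouton/glou.py | monaye
-- ===== SOURCE A (Python) =====
-- euros = [1, 2, 5, 10, 20, 50, 100, 200]
--
-- def monaie(s):
--     i = len(euros) - 1
--     p = 0
--     while s > 0:
--         if s >= euros[i]:
--             s -= euros[i]
--             p += 1
--         else:
--             i -= 1
--     return p
--
-- def monaye(a):
--     tab = []
--     for i in range(a):
--         tab.append(monaie(i))
--     x=max(tab)
--     y=[]
--     for j in range(len(tab)):
--         if tab[j]==x:
--             y.append(j)
--     return y
-- ===== SOURCE B (Python) =====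
-- euros = [1, 2, 5, 10, 20, 50, 100, 200]
--
-- def monaie(s):
--     i = len(euros) - 1
--     p = 0
--     while s > 0:
--         if s >= euros[i]:
--             s -= euros[i]
--             p += 1
--         else:
--             i -= 1
--     return p
--
-- def monaye(a):
--     groups = {}
--     for i in range(a):
--         groups.setdefault(monaie(i), []).append(i)
--     return groups[max(groups)]
-- ===== Notes on version B (the rewrite author's own statement) =====
-- stated objective: simpler
-- what changed: Instead of materializing the list of coin counts, scanning it for the max, and then re-scanning it to collect matching indices, B makes a single pass grouping indices by coin count into a dict and returns the group of the maximal key; on a <= 0 both raise ValueError from max of an empty sequence (excluded by Pre_).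
-- outside the precondition, e.g. on monaye(0): A raises ValueError, B raises ValueError
import Mathlib
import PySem

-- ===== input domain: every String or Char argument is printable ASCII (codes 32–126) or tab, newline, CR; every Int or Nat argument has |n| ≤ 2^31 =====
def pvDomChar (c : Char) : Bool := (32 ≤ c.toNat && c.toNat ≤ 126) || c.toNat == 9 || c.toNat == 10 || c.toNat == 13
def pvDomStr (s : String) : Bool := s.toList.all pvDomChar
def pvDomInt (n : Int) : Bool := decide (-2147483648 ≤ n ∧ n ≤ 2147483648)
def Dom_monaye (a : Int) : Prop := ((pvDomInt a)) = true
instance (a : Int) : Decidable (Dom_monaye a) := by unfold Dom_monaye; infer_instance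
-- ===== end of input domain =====

-- B replaces A's build-list / scan-for-max / filter-indices passes by one grouping pass into a dict plus a lookup at the maximal key (objective: simpler).

-- ===== PORT A =====
def euros : List Int := [1, 2, 5, 10, 20, 50, 100, 200]

-- the while-loop of monaie, with a fuel bound ≥ its iteration count (the measure s*16+16 drops
-- each turn, so the fuel is never exhausted); the 'none' branch is Python's IndexError, unreachable
-- from monaie's start state
def monaieLoop : Nat → Int → Int → Int → Int
  | 0, _, _, p => p
  | fuel + 1, s, i, p =>
    if 0 < s then
      match PySem.List.pyGet? euros i with
      | none => p
      | some c =>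
        if s ≥ c then monaieLoop fuel (s - c) i (p + 1)
        else monaieLoop fuel s (i - 1) p
    else p

def monaie (s : Int) : Int := monaieLoop (s.toNat * 16 + 32) s ((euros.length : Int) - 1) 0

def monaye (a : Int) : List Int :=
  let tab := (PySem.List.pyRange 0 a 1).foldl (fun t i => t ++ [monaie i]) []
  match PySem.List.max? tab (fun v => v) with
  | none => []  -- Python: max([]) raises ValueError here; excluded by Pre_monaye
  | some x =>
    (PySem.List.pyRange 0 (tab.length : Int) 1).foldl
      (fun y j => if PySem.List.pyGetD tab j 0 = x then y ++ [j] else y) []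

-- ===== PORT B =====
def monaye_alt (a : Int) : List Int :=
  let groups : PySem.Dict Int (List Int) :=
    (PySem.List.pyRange 0 a 1).foldl
      (fun d i => d.modify (monaie i) [] (· ++ [i])) PySem.Dict.empty
  match PySem.List.max? groups.keys (fun k => k) with
  | none => []  -- Python: max({}) raises ValueError here; excluded by Pre_monaye
  | some m => groups.getD m []

-- ===== PRECONDITION & SPEC =====
-- Pre_ excludes a ≤ 0, where both A and B raise ValueError (max of an empty sequence).
def Pre_monaye (a : Int) : Prop := 1 ≤ a
instance (a : Int) : Decidable (Pre_monaye a) := by unfold Pre_monaye; infer_instance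
def pvWitness_monaye : Int := 5

def Spec_monaye (a : Int) (out : List Int) : Prop := out = monaye_alt a
instance (a : Int) (out : List Int) : Decidable (Spec_monaye a out) := by unfold Spec_monaye; infer_instance

-- ===== CLAIM (what is proved, stated in full; the proofs are below) =====
def Claim_equal_monaye : Prop := ∀ (a : Int), Dom_monaye a → Pre_monaye a → Spec_monaye a (monaye a)

-- ===== LEMMAS AND PROOFS =====

-- max? with the identity key depends only on the set of elements
theorem max?_id_eq_of_mem_iff (xs ys : List Int) (h : ∀ z, z ∈ xs ↔ z ∈ ys) :
    PySem.List.max? xs (fun v => v) = PySem.List.max? ys (fun v => v) := by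
  cases hx : PySem.List.max? xs (fun v => v) with
  | none =>
    rw [PySem.List.max?_eq_none_iff] at hx
    cases hy : PySem.List.max? ys (fun v => v) with
    | none => rfl
    | some m =>
      have := PySem.List.max?_mem hy
      rw [← h] at this
      simp [hx] at this
  | some m =>
    cases hy : PySem.List.max? ys (fun v => v) with
    | none =>
      rw [PySem.List.max?_eq_none_iff] at hy
      have := PySem.List.max?_mem hx
      rw [h] at this
      simp [hy] at this
    | some m' =>
      have hm := PySem.List.max?_mem hx
      have hm' := PySem.List.max?_mem hy
      have h1 := PySem.List.max?_isMax hx m' ((h m').mpr hm')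
      have h2 := PySem.List.max?_isMax hy m ((h m).mp hm)
      simp only at h1 h2
      exact congrArg some (le_antisymm h2 h1)

theorem monaye_spec_aux (a : Int) (ha : 1 ≤ a) : monaye a = monaye_alt a := by
  unfold monaye monaye_alt
  simp only
  set l := PySem.List.pyRange 0 a 1 with hl
  -- A's first loop builds tab = l.map monaie
  rw [PySem.List.foldl_append_singleton_eq_map, List.nil_append]
  set groups : PySem.Dict Int (List Int) :=
    l.foldl (fun d i => d.modify (monaie i) [] (· ++ [i])) PySem.Dict.empty with hg
  have hkeys : groups.keys
      = PySem.Set.update (PySem.Dict.empty : PySem.Dict Int (List Int)).keys (l.map monaie) := by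
    rw [hg, PySem.Dict.keys_foldl_modify_key]
  have hmemkeys : ∀ z, z ∈ l.map monaie ↔ z ∈ groups.keys := by
    intro z
    rw [hkeys, PySem.Set.mem_update]
    simp [PySem.Dict.empty]
  rw [max?_id_eq_of_mem_iff _ _ hmemkeys]
  cases hm : PySem.List.max? groups.keys (fun v => v) with
  | none => rfl
  | some m =>
    dsimp only
    -- B's grouping pass: groups[m] is the list of i ∈ l with monaie i = m
    have hBgroups : groups = (l.map (fun i => (monaie i, i))).foldl
        (fun d p => d.modify p.1 [] (· ++ [p.2])) PySem.Dict.empty := by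
      rw [hg, List.foldl_map]
    have hB : groups.getD m [] = l.filter (fun i => monaie i == m) := by
      rw [hBgroups, PySem.Dict.getD_foldl_modify_append]
      simp [List.filter_map, List.map_map, Function.comp_def]
    rw [hB]
    -- A's second loop is the same filter over the same range
    have hlen : (((l.map monaie).length : Int)) = a := by
      simp [hl, PySem.List.length_pyRange_one]
      omega
    rw [hlen]
    clear_value groups l
    subst hl
    rw [PySem.List.foldl_append_ite_eq_filter
      (fun j => PySem.List.pyGetD (List.map monaie (PySem.List.pyRange 0 a 1)) j 0 = m)]
    simp only [List.nil_append]
    apply List.filter_congr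
    intro j hj
    rw [PySem.List.mem_pyRange_one] at hj
    rw [PySem.List.pyGetD_map_pyRange_of_nonneg monaie a j 0 hj.1 hj.2]
    rfl

-- ===== VERDICT (by name: the statement is the Claim_ definition above) =====
theorem monaye_spec : Claim_equal_monaye := by
  intro a _ ha
  unfold Spec_monaye
  exact monaye_spec_aux a ha
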